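-- pv_equiv track=rewrite | github.com/z-w-wang/Leetcode-Problemlist | LeetcodeCup/2023-04-22_2.py | adventureCamp
-- ===== SOURCE A (Python) =====
-- from typing import List
--
-- def adventureCamp(expeditions: List[str]) -> int:
--     max_appear_num = 0
--     idx = -1
--     seen = set()
--     init = expeditions[0].split('->')
--     for camp in init:
--         seen.add(camp)
--     for i in range(1, len(expeditions)):
--         camps = expeditions[i].split('->')
--         if expeditions[i] == '':
--             continue
--         count = 0
--         for camp in camps:
--             if camp not in seen:
--                 count += 1
--                 seen.add(camp)
--         if count > max_appear_num:
--             max_appear_num = count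
--             idx = i
--     return idx
-- ===== SOURCE B (Python) =====
-- from typing import List
--
-- def adventureCamp(expeditions: List[str]) -> int:
--     # Map each camp to the index of the expedition that first mentions it.
--     first = {}
--     for camp in expeditions[0].split('->'):
--         first.setdefault(camp, 0)
--     for i in range(1, len(expeditions)):
--         if expeditions[i] == '':
--             continue
--         for camp in expeditions[i].split('->'):
--             first.setdefault(camp, i)
--     # counts[i] = number of camps first introduced by expedition i (i >= 1).
--     counts = {}
--     for v in first.values():
--         if v > 0:
--             counts[v] = counts.get(v, 0) + 1
--     idx, best = -1, 0
--     for i in range(1, len(expeditions)):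
--         c = counts.get(i, 0)
--         if c > best:
--             idx, best = i, c
--     return idx
-- ===== Notes on version B (the rewrite author's own statement) =====
-- stated objective: alternative
-- what changed: Instead of accumulating a seen-set while counting new camps inline in the selection loop, B builds a first-occurrence dict (camp -> index of first expedition mentioning it), aggregates its values into a per-expedition count table, and then selects the argmax by table lookup alone.
import Mathlib
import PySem

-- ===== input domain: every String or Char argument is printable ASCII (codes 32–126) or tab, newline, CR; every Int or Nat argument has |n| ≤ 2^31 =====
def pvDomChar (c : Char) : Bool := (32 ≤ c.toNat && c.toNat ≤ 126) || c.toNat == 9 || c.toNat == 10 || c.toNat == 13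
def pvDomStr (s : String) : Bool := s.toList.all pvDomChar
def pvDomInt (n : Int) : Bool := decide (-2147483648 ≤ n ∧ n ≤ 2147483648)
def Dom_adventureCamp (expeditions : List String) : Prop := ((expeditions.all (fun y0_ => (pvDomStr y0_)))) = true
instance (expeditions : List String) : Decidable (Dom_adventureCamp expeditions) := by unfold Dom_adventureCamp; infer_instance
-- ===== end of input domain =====

-- B replaces A's inline seen-set counting with a first-occurrence dict plus a count table (objective: alternative).

-- ===== PORT A =====
-- s.split('->'): the separator "->" is nonempty, so PySem.Str.split? is always `some` (exact).
def pySplitArrow (s : String) : List String :=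
  (PySem.Str.split? s "->").getD []

def stepCampA (p : Int × PySem.Set String) (camp : String) : Int × PySem.Set String :=
  if PySem.Set.contains p.2 camp then p else (p.1 + 1, PySem.Set.add p.2 camp)

def stepExpA (st : Int × Int × PySem.Set String) (i : Int) (s : String) :
    Int × Int × PySem.Set String :=
  let camps := pySplitArrow s
  if s == "" then st
  else
    let q := camps.foldl stepCampA (0, st.2.2)
    if q.1 > st.1 then (q.1, i, q.2) else (st.1, st.2.1, q.2)

def adventureCamp (expeditions : List String) : Int :=
  match expeditions with
  | [] => 0   -- Python raises IndexError on expeditions[0]; excluded by Pre_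
  | e0 :: _ =>
    let seen := (pySplitArrow e0).foldl PySem.Set.add PySem.Set.empty
    ((PySem.List.pyRange 1 (PySem.List.len expeditions) 1).foldl
        (fun st i => stepExpA st i (PySem.List.pyGetD expeditions i ""))
        (0, -1, seen)).2.1

-- ===== PORT B =====
def stepFirstB (i : Int) (d : PySem.Dict String Int) (s : String) : PySem.Dict String Int :=
  if s == "" then d
  else (pySplitArrow s).foldl (fun d camp => PySem.Dict.setdefault d camp i) d

def countsB (first : PySem.Dict String Int) : PySem.Dict Int Int :=
  first.values.foldl
    (fun m v => if v > 0 then m.insert v (m.getD v 0 + 1) else m) PySem.Dict.empty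

def stepSelB (counts : PySem.Dict Int Int) (p : Int × Int) (i : Int) : Int × Int :=
  let c := counts.getD i 0
  if c > p.2 then (i, c) else p

def adventureCamp_alt (expeditions : List String) : Int :=
  match expeditions with
  | [] => 0   -- Python raises IndexError on expeditions[0]; excluded by Pre_
  | e0 :: _ =>
    let first0 := (pySplitArrow e0).foldl
        (fun d camp => PySem.Dict.setdefault d camp 0) PySem.Dict.empty
    let first := (PySem.List.pyRange 1 (PySem.List.len expeditions) 1).foldl
        (fun d i => stepFirstB i d (PySem.List.pyGetD expeditions i "")) first0
    let counts := countsB first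
    ((PySem.List.pyRange 1 (PySem.List.len expeditions) 1).foldl
        (fun p i => stepSelB counts p i) (-1, 0)).1

-- ===== PRECONDITION & SPEC =====
-- Python A evaluates expeditions[0], which raises IndexError on the empty list (B does the same).
def Pre_adventureCamp (expeditions : List String) : Prop := expeditions ≠ []
instance (expeditions : List String) : Decidable (Pre_adventureCamp expeditions) := by
  unfold Pre_adventureCamp; infer_instance

def pvWitness_adventureCamp : List String := ["a->b", "b->c", ""]

def Spec_adventureCamp (expeditions : List String) (out : Int) : Prop := out = adventureCamp_alt expeditions
instance (expeditions : List String) (out : Int) : Decidable (Spec_adventureCamp expeditions out) := by unfold Spec_adventureCamp; infer_instance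

-- ===== CLAIM (what is proved, stated in full; the proofs are below) =====
def Claim_equal_adventureCamp : Prop := ∀ (expeditions : List String), Dom_adventureCamp expeditions → Pre_adventureCamp expeditions → Spec_adventureCamp expeditions (adventureCamp expeditions)

-- ===== LEMMAS AND PROOFS =====

-- A `for i in range(a, n)` loop that reads xs[i], as structural recursion over the suffix.
def goIdx {σ : Type} (g : σ → Int → String → σ) : List String → Int → σ → σ
  | [], _, st => st
  | s :: t, i, st => goIdx g t (i + 1) (g st i s)

lemma pyRange_foldl_goIdx {σ : Type} (g : σ → Int → String → σ) (xs : List String) :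
    ∀ (n : Nat) (a : Int) (init : σ), 0 ≤ a → xs.length ≤ a.toNat + n →
    (PySem.List.pyRange a (PySem.List.len xs)).foldl
        (fun acc i => g acc i (PySem.List.pyGetD xs i "")) init
      = goIdx g (xs.drop a.toNat) a init := by
  have hlen : PySem.List.len xs = (xs.length : Int) := by simp [PySem.List.len]
  intro n
  induction n with
  | zero =>
    intro a init ha hn
    have hle : xs.length ≤ a.toNat := by omega
    rw [PySem.List.pyRange_one_eq_nil (by rw [hlen]; omega), List.drop_eq_nil_of_le hle]
    simp [goIdx]
  | succ n ih =>
    intro a init ha hn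
    by_cases hlt : a.toNat < xs.length
    · have hlt' : a < PySem.List.len xs := by rw [hlen]; omega
      have hget : PySem.List.pyGetD xs a "" = xs[a.toNat] :=
        PySem.List.pyGetD_eq_getElem xs "" ha (by omega)
      have hdrop : xs.drop a.toNat = xs[a.toNat] :: xs.drop (a.toNat + 1) :=
        List.drop_eq_getElem_cons hlt
      have h1 : (a + 1).toNat = a.toNat + 1 := by omega
      rw [PySem.List.pyRange_one_cons hlt', List.foldl_cons, hget, hdrop, goIdx,
        ih (a + 1) _ (by omega) (by omega), h1]
    · have hle : xs.length ≤ a.toNat := by omega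
      rw [PySem.List.pyRange_one_eq_nil (by rw [hlen]; omega), List.drop_eq_nil_of_le hle]
      simp [goIdx]

lemma set_contains_eq_decide_mem (s : PySem.Set String) (x : String) :
    PySem.Set.contains s x = decide (x ∈ s) := by
  simp [PySem.Set.contains]

-- the seen-set and the first-index dict keep the same membership through one camp
lemma sync_step (seen : PySem.Set String) (d : PySem.Dict String Int) (c : String) (i : Int)
    (hsync : ∀ x, PySem.Set.contains seen x = d.contains x) :
    ∀ x, PySem.Set.contains (PySem.Set.add seen c) x = (d.insert c i).contains x := by
  intro x
  rw [PySem.Dict.contains_insert, ← hsync x]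
  simp only [set_contains_eq_decide_mem]
  by_cases hxc : x = c
  · subst hxc; simp [PySem.Set.mem_add]
  · simp [PySem.Set.mem_add, hxc]

lemma insert_values_fresh (d : PySem.Dict String Int) {c : String} (i : Int)
    (hd : d.contains c = false) : (d.insert c i).values = d.values ++ [i] := by
  have h := PySem.Dict.items_insert_of_not_contains d i hd
  simp [PySem.Dict.values, h]

-- A's inner camp loop against B's setdefault loop over the same camps
lemma campLoop (cs : List String) :
    ∀ (cnt : Int) (seen : PySem.Set String) (d : PySem.Dict String Int) (i : Int),
    (∀ c, PySem.Set.contains seen c = d.contains c) →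
    ((∀ c, PySem.Set.contains (cs.foldl stepCampA (cnt, seen)).2 c
        = (cs.foldl (fun d camp => PySem.Dict.setdefault d camp i) d).contains c) ∧
     ∃ ext : List Int,
       (cs.foldl (fun d camp => PySem.Dict.setdefault d camp i) d).values = d.values ++ ext ∧
       (∀ v ∈ ext, v = i) ∧
       (cs.foldl stepCampA (cnt, seen)).1 = cnt + ext.length) := by
  induction cs with
  | nil =>
    intro cnt seen d i hsync
    exact ⟨hsync, [], by simp, by simp, by simp⟩
  | cons c t ih =>
    intro cnt seen d i hsync
    by_cases h : PySem.Set.contains seen c = true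
    · have hd : d.contains c = true := by rw [← hsync]; exact h
      have hm : c ∈ seen := by simpa [set_contains_eq_decide_mem] using h
      have hstep : stepCampA (cnt, seen) c = (cnt, seen) := by
        simp [stepCampA, hm]
      rw [List.foldl_cons, List.foldl_cons, hstep, PySem.Dict.setdefault_of_contains d i hd]
      exact ih cnt seen d i hsync
    · have h' : PySem.Set.contains seen c = false := by
        cases hb : PySem.Set.contains seen c with
        | false => rfl
        | true => exact absurd hb h
      have hd : d.contains c = false := by rw [← hsync]; exact h'
      have hm : c ∉ seen := by simpa [set_contains_eq_decide_mem] using h'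
      have hstep : stepCampA (cnt, seen) c = (cnt + 1, PySem.Set.add seen c) := by
        simp [stepCampA, hm]
      rw [List.foldl_cons, List.foldl_cons, hstep,
        PySem.Dict.setdefault_of_not_contains d i hd]
      obtain ⟨sync', ext, hvals, hvi, hcnt⟩ :=
        ih (cnt + 1) (PySem.Set.add seen c) (d.insert c i) i (sync_step seen d c i hsync)
      refine ⟨sync', i :: ext, ?_, ?_, ?_⟩
      · rw [hvals, insert_values_fresh d i hd]; simp
      · rintro v hv
        rcases List.mem_cons.mp hv with rfl | hv
        · rfl
        · exact hvi v hv
      · rw [hcnt]; simp only [List.length_cons]; push_cast; omega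

-- values added by a setdefault loop all carry index i
lemma setdefaultFold_values (cs : List String) :
    ∀ (d : PySem.Dict String Int) (i : Int),
    ∃ ext : List Int,
      (cs.foldl (fun d camp => PySem.Dict.setdefault d camp i) d).values = d.values ++ ext ∧
      ∀ v ∈ ext, v = i := by
  induction cs with
  | nil => intro d i; exact ⟨[], by simp, by simp⟩
  | cons c t ih =>
    intro d i
    rw [List.foldl_cons]
    cases hd : d.contains c with
    | true =>
      rw [PySem.Dict.setdefault_of_contains d i hd]
      exact ih d i
    | false =>
      rw [PySem.Dict.setdefault_of_not_contains d i hd]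
      obtain ⟨ext, hvals, hvi⟩ := ih (d.insert c i) i
      refine ⟨i :: ext, ?_, ?_⟩
      · rw [hvals, insert_values_fresh d i hd]; simp
      · rintro v hv
        rcases List.mem_cons.mp hv with rfl | hv
        · rfl
        · exact hvi v hv

-- seeding from expeditions[0]: same membership, all recorded indices are 0
lemma seedLoop (cs : List String) :
    ∀ (seen : PySem.Set String) (d : PySem.Dict String Int),
    (∀ c, PySem.Set.contains seen c = d.contains c) → (∀ v ∈ d.values, v = 0) →
    (∀ c, PySem.Set.contains (cs.foldl PySem.Set.add seen) c
        = (cs.foldl (fun d camp => PySem.Dict.setdefault d camp 0) d).contains c) ∧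
    (∀ v ∈ (cs.foldl (fun d camp => PySem.Dict.setdefault d camp 0) d).values, v = 0) := by
  induction cs with
  | nil => intro seen d hsync hv; exact ⟨hsync, hv⟩
  | cons c t ih =>
    intro seen d hsync hv
    rw [List.foldl_cons, List.foldl_cons]
    cases hd : d.contains c with
    | true =>
      have h : PySem.Set.contains seen c = true := by rw [hsync]; exact hd
      have hm : c ∈ seen := by simpa [set_contains_eq_decide_mem] using h
      have hadd : PySem.Set.add seen c = seen := by
        simp [PySem.Set.add, hm]
      rw [hadd, PySem.Dict.setdefault_of_contains d (0 : Int) hd]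
      exact ih seen d hsync hv
    | false =>
      rw [PySem.Dict.setdefault_of_not_contains d 0 hd]
      refine ih (PySem.Set.add seen c) (d.insert c 0) (sync_step seen d c 0 hsync) ?_
      intro v hvv
      rw [insert_values_fresh d 0 hd] at hvv
      rcases List.mem_append.mp hvv with hvv | hvv
      · exact hv v hvv
      · simpa using hvv

-- every value the first-index loop adds from position i on is ≥ i
lemma valuesExt (l : List String) :
    ∀ (i : Int) (d : PySem.Dict String Int),
    ∃ ext : List Int,
      (goIdx (fun d j s => stepFirstB j d s) l i d).values = d.values ++ ext ∧
      ∀ v ∈ ext, i ≤ v := by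
  induction l with
  | nil => intro i d; exact ⟨[], by simp [goIdx], by simp⟩
  | cons s t ih =>
    intro i d
    rw [goIdx]
    obtain ⟨ext2, h2, hge2⟩ := ih (i + 1) (stepFirstB i d s)
    by_cases hs : (s == "") = true
    · have hst : stepFirstB i d s = d := by simp [stepFirstB, hs]
      rw [hst] at h2 ⊢
      exact ⟨ext2, h2, fun v hv => by have := hge2 v hv; omega⟩
    · have hs' : (s == "") = false := by
        cases hb : (s == "") with
        | false => rfl
        | true => exact absurd hb hs
      have hst : stepFirstB i d s
          = (pySplitArrow s).foldl (fun d camp => PySem.Dict.setdefault d camp i) d := by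
        simp [stepFirstB, hs']
      obtain ⟨ext1, h1, hv1⟩ := setdefaultFold_values (pySplitArrow s) d i
      refine ⟨ext1 ++ ext2, ?_, ?_⟩
      · rw [h2, hst, h1, List.append_assoc]
      · intro v hv
        rcases List.mem_append.mp hv with hv | hv
        · rw [hv1 v hv]
        · have := hge2 v hv; omega

-- the count table reads off the multiplicity of i among first-occurrence indices
lemma countsB_getD (first : PySem.Dict String Int) (i : Int) (hi : 0 < i) :
    (countsB first).getD i 0 = (first.values.count i : Int) := by
  unfold countsB
  have h1 := PySem.List.foldl_ite_eq_foldl_filter (p := fun v : Int => v > 0)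
    (f := fun (m : PySem.Dict Int Int) (v : Int) => PySem.Dict.insert m v (m.getD v 0 + 1))
    first.values PySem.Dict.empty
  simp only [] at h1
  rw [h1, PySem.Dict.foldl_insert_getD_add_one_eq_counter, PySem.Dict.getD_counter,
    List.count_filter (by simpa using hi)]

lemma count_eq_zero_of_lt (l : List Int) (i : Int) (h : ∀ v ∈ l, ¬ v = i) :
    l.count i = 0 := by
  rw [List.count_eq_zero]
  intro hm
  exact h i hm rfl

-- main loop invariant: A's running (best, idx, seen) matches B's table-driven selection
lemma mainLoop (l : List String) :
    ∀ (i best idx : Int) (seen : PySem.Set String) (d : PySem.Dict String Int),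
    0 < i → 0 ≤ best →
    (∀ c, PySem.Set.contains seen c = d.contains c) →
    (∀ v ∈ d.values, v < i) →
    ((goIdx (fun st j s => stepExpA st j s) l i (best, idx, seen)).1
       = (goIdx (fun p j _ => stepSelB (countsB (goIdx (fun d j s => stepFirstB j d s) l i d)) p j)
            l i (idx, best)).2
     ∧ (goIdx (fun st j s => stepExpA st j s) l i (best, idx, seen)).2.1
       = (goIdx (fun p j _ => stepSelB (countsB (goIdx (fun d j s => stepFirstB j d s) l i d)) p j)
            l i (idx, best)).1) := by
  induction l with
  | nil => intro i best idx seen d hi hb hsync hvals; exact ⟨rfl, rfl⟩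
  | cons s t ih =>
    intro i best idx seen d hi hb hsync hvals
    rw [goIdx, goIdx, goIdx]
    by_cases hs : (s == "") = true
    · -- empty expedition: A skips; B's table has count 0 there
      have hstA : stepExpA (best, idx, seen) i s = (best, idx, seen) := by
        simp [stepExpA, hs]
      have hstF : stepFirstB i d s = d := by simp [stepFirstB, hs]
      rw [hstA, hstF]
      obtain ⟨ext2, h2, hge2⟩ := valuesExt t (i + 1) d
      have hcnt : (countsB (goIdx (fun d j s => stepFirstB j d s) t (i + 1) d)).getD i 0 = 0 := by
        rw [countsB_getD _ i hi, h2, List.count_append,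
          count_eq_zero_of_lt d.values i (fun v hv h => by have := hvals v hv; omega),
          count_eq_zero_of_lt ext2 i (fun v hv h => by have := hge2 v hv; omega)]
        simp
      have hstS : stepSelB (countsB (goIdx (fun d j s => stepFirstB j d s) t (i + 1) d))
          (idx, best) i = (idx, best) := by
        simp only [stepSelB, hcnt]
        rw [if_neg (by omega)]
      rw [hstS]
      exact ih (i + 1) best idx seen d (by omega) hb hsync
        (fun v hv => by have := hvals v hv; omega)
    · have hs' : (s == "") = false := by
        cases hb2 : (s == "") with
        | false => rfl
        | true => exact absurd hb2 hs
      obtain ⟨sync', ext1, hvals1, hv1, hcnt1⟩ := campLoop (pySplitArrow s) 0 seen d i hsync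
      set q := (pySplitArrow s).foldl stepCampA (0, seen) with hq
      set d' := (pySplitArrow s).foldl (fun d camp => PySem.Dict.setdefault d camp i) d with hd'
      have hstF : stepFirstB i d s = d' := by simp [stepFirstB, hs', hd']
      have hstA : stepExpA (best, idx, seen) i s
          = (if q.1 > best then (q.1, i, q.2) else (best, idx, q.2)) := by
        simp only [stepExpA, hs', Bool.false_eq_true, if_false]
        rfl
      rw [hstA, hstF]
      obtain ⟨ext2, h2, hge2⟩ := valuesExt t (i + 1) d'
      have hcount : (countsB (goIdx (fun d j s => stepFirstB j d s) t (i + 1) d')).getD i 0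
          = q.1 := by
        rw [countsB_getD _ i hi, h2, hvals1, List.count_append, List.count_append,
          count_eq_zero_of_lt d.values i (fun v hv h => by have := hvals v hv; omega),
          count_eq_zero_of_lt ext2 i (fun v hv h => by have := hge2 v hv; omega),
          List.count_eq_length.mpr (fun v hv => (hv1 v hv).symm), hcnt1]
        simp
      have hvals' : ∀ v ∈ d'.values, v < i + 1 := by
        intro v hv
        rw [hvals1] at hv
        rcases List.mem_append.mp hv with hv | hv
        · have := hvals v hv; omega
        · have := hv1 v hv; omega
      have hq1 : 0 ≤ q.1 := by rw [hcnt1]; positivity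
      by_cases hgt : q.1 > best
      · have hstS : stepSelB (countsB (goIdx (fun d j s => stepFirstB j d s) t (i + 1) d'))
            (idx, best) i = (i, q.1) := by
          simp only [stepSelB, hcount]
          rw [if_pos hgt]
        rw [if_pos hgt, hstS]
        exact ih (i + 1) q.1 i q.2 d' (by omega) hq1 sync' hvals'
      · have hstS : stepSelB (countsB (goIdx (fun d j s => stepFirstB j d s) t (i + 1) d'))
            (idx, best) i = (idx, best) := by
          simp only [stepSelB, hcount]
          rw [if_neg hgt]
        rw [if_neg hgt, hstS]
        exact ih (i + 1) best idx q.2 d' (by omega) hb sync' hvals'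

-- ===== VERDICT (by name: the statement is the Claim_ definition above) =====
theorem adventureCamp_spec : Claim_equal_adventureCamp := by
  intro expeditions hdom hpre
  unfold Spec_adventureCamp
  match expeditions with
  | [] => exact absurd rfl hpre
  | e0 :: rest =>
    simp only [adventureCamp, adventureCamp_alt]
    have hA := pyRange_foldl_goIdx (fun st j s => stepExpA st j s) (e0 :: rest)
      (e0 :: rest).length 1 (0, -1, (pySplitArrow e0).foldl PySem.Set.add PySem.Set.empty)
      (by omega) (by omega)
    have hF := pyRange_foldl_goIdx (fun d j s => stepFirstB j d s) (e0 :: rest)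
      (e0 :: rest).length 1
      ((pySplitArrow e0).foldl (fun d camp => PySem.Dict.setdefault d camp 0) PySem.Dict.empty)
      (by omega) (by omega)
    simp only [] at hA hF
    rw [hA, hF]
    set first0 : PySem.Dict String Int := (pySplitArrow e0).foldl
      (fun d camp => PySem.Dict.setdefault d camp 0) PySem.Dict.empty with hfirst0
    set firstF : PySem.Dict String Int :=
      goIdx (fun d j s => stepFirstB j d s) ((e0 :: rest).drop (1 : Int).toNat)
      1 first0 with hfirstF
    have hS := pyRange_foldl_goIdx (fun p j _ => stepSelB (countsB firstF) p j) (e0 :: rest)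
      (e0 :: rest).length 1 ((-1 : Int), (0 : Int)) (by omega) (by omega)
    simp only [] at hS
    rw [hS]
    have hdrop : (e0 :: rest).drop (1 : Int).toNat = rest := by simp
    rw [hdrop] at hfirstF ⊢
    obtain ⟨sync0, hv0⟩ := seedLoop (pySplitArrow e0) PySem.Set.empty PySem.Dict.empty
      (by intro c; simp [PySem.Set.contains, PySem.Set.empty, PySem.Dict.contains_empty])
      (by intro v hv; simp [PySem.Dict.empty, PySem.Dict.values] at hv)
    have hmain := mainLoop rest 1 0 (-1)
      ((pySplitArrow e0).foldl PySem.Set.add PySem.Set.empty) first0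
      (by omega) (by omega) sync0
      (by intro v hv; have := hv0 v hv; omega)
    rw [hfirstF]
    exact hmain.2
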